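-- pv_equiv track=rewrite | github.com/emmableu/CuratingExamples | my_module/save_load_pickle.py | get_opposite
-- ===== SOURCE A (Python) =====
-- def get_opposite(l, ind):
--     opposite_list = []
--     for i, e in enumerate(l):
--         if i in ind:
--             continue
--         else:
--             opposite_list.append(e)
--     return opposite_list
-- ===== SOURCE B (Python) =====
-- def get_opposite(l, ind):
--     keep = set(range(len(l))) - set(ind)
--     return [l[i] for i in sorted(keep)]
-- ===== Notes on version B (the rewrite author's own statement) =====
-- stated objective: idiomatic
-- what changed: Replaces the membership-tested scan of l with a set difference of index sets followed by positional lookup over the sorted surviving indices.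
import Mathlib
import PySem

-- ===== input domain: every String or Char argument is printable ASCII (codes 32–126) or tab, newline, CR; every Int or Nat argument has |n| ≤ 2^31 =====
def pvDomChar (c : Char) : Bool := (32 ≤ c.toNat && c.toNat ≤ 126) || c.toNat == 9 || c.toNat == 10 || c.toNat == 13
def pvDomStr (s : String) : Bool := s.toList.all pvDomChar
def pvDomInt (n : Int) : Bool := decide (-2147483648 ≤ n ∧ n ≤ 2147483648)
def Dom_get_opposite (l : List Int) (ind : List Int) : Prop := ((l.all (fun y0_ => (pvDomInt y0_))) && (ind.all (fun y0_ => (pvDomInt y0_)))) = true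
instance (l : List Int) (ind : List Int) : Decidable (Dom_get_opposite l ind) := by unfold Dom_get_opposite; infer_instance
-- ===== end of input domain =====

-- B replaces A's membership-tested scan of l with an index-set difference followed by
-- positional lookup over the sorted surviving indices (idiomatic alternative; no speed claim).


-- ===== PORT A =====
-- for i, e in enumerate(l): if i in ind: continue; else: opposite_list.append(e)
def get_opposite (l : List Int) (ind : List Int) : List Int :=
  (PySem.List.enumerate l 0).foldl
    (fun opposite_list ie => if ie.1 ∈ ind then opposite_list else opposite_list ++ [ie.2]) []

-- ===== PORT B =====
-- keep = set(range(len(l))) - set(ind); return [l[i] for i in sorted(keep)]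
-- (l[i] ported as pyGetD with default 0: every i in keep is a valid index of l, so the default is never used)
def get_opposite_alt (l : List Int) (ind : List Int) : List Int :=
  let keep : PySem.Set Int :=
    PySem.Set.diff (PySem.Set.ofList (PySem.List.pyRange 0 (l.length : Int) 1)) (PySem.Set.ofList ind)
  (PySem.List.sorted keep (fun i => i) false).map (fun i => PySem.List.pyGetD l i 0)

-- ===== PRECONDITION & SPEC =====
def Spec_get_opposite (l : List Int) (ind : List Int) (out : List Int) : Prop := out = get_opposite_alt l ind
instance (l : List Int) (ind : List Int) (out : List Int) : Decidable (Spec_get_opposite l ind out) := by unfold Spec_get_opposite; infer_instance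

-- ===== CLAIM (what is proved, stated in full; the proofs are below) =====
def Claim_equal_get_opposite : Prop := ∀ (l : List Int) (ind : List Int), Dom_get_opposite l ind → Spec_get_opposite l ind (get_opposite l ind)

-- ===== LEMMAS AND PROOFS =====

-- A's loop, generalized over the enumerate start, in terms of List.range positions.
theorem pvA_eq_kept_gen (ind : List Int) :
    ∀ (l : List Int) (s : Nat),
      ((PySem.List.enumerate l (s : Int)).filter (fun ie => !(ind.contains ie.1))).map (·.2)
      = ((List.range l.length).filter (fun k => !(ind.contains ((s + k : Nat) : Int)))).map
          (fun k => (l.getD k 0)) := by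
  intro l
  induction l with
  | nil => intro s; simp [PySem.List.enumerate_nil]
  | cons x xs ih =>
    intro s
    have hcast : ((s : Int) + 1) = ((s + 1 : Nat) : Int) := by push_cast; ring
    rw [PySem.List.enumerate_cons, hcast]
    simp only [List.length_cons, List.range_succ_eq_map, List.filter_cons, List.filter_map,
      Nat.add_zero]
    have htail : ((PySem.List.enumerate xs ((s + 1 : Nat) : Int)).filter
          (fun ie => !(ind.contains ie.1))).map (·.2)
        = ((List.range xs.length).filter
            (fun k => !(ind.contains ((s + Nat.succ k : Nat) : Int)))).map
            (fun k => ((x :: xs).getD (Nat.succ k) 0)) := by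
      rw [ih (s + 1)]
      rw [List.filter_congr (by intro k _; congr 2; omega :
        ∀ k ∈ List.range xs.length,
          (!(ind.contains (((s + 1) + k : Nat) : Int)))
          = (!(ind.contains ((s + Nat.succ k : Nat) : Int))))]
      exact List.map_congr_left (fun k _ => by simp)
    cases hc : ind.contains ((s : Int)) with
    | true => simpa using htail
    | false => simpa using congrArg (x :: ·) htail

-- ===== VERDICT (by name: the statement is the Claim_ definition above) =====
theorem get_opposite_spec : Claim_equal_get_opposite := by
  intro l ind _
  unfold Spec_get_opposite get_opposite get_opposite_alt
  -- A side: loop shape → filter/map over enumerate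
  have hA : (PySem.List.enumerate l 0).foldl
      (fun opposite_list ie => if ie.1 ∈ ind then opposite_list else opposite_list ++ [ie.2]) []
      = ((PySem.List.enumerate l 0).filter (fun ie => !(ind.contains ie.1))).map (·.2) := by
    rw [show (fun (opposite_list : List Int) (ie : Int × Int) =>
          if ie.1 ∈ ind then opposite_list else opposite_list ++ [ie.2])
        = (fun opposite_list ie =>
          if (!(ind.contains ie.1)) = true then opposite_list ++ [ie.2] else opposite_list) from by
      funext acc ie
      by_cases h : ie.1 ∈ ind <;> simp [h]]
    rw [PySem.List.foldl_append_if]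
    simp
  rw [hA]
  have h0 : ((0 : Int)) = ((0 : Nat) : Int) := rfl
  conv_lhs => rw [h0, pvA_eq_kept_gen ind l 0]
  -- B side
  rw [PySem.Set.ofList_eq_self_of_nodup _ (PySem.List.nodup_pyRange_one 0 _)]
  rw [show ∀ (s t : List Int), PySem.Set.diff s t = s.filter (fun x => !(t.contains x)) from by
        intro s t; simp [PySem.Set.diff, PySem.Set.contains]]
  -- the kept indices are strictly increasing, so sorted leaves them unchanged
  simp only [PySem.List.sorted_eq_of_perm_of_pairwise_lt _ _ _ (List.Perm.refl _)
    (List.Pairwise.filter _ (PySem.List.pairwise_lt_pyRange_one 0 _))]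
  -- rewrite pyRange as mapped List.range and push the filter/map through
  rw [PySem.List.pyRange_one]
  simp only [Int.sub_zero, Int.toNat_natCast, List.filter_map, List.map_map]
  symm
  rw [List.filter_congr (by
    intro k _
    simp [Function.comp, PySem.Set.mem_ofList] :
    ∀ k ∈ List.range l.length,
      ((fun x => !(List.contains (PySem.Set.ofList ind) x)) ∘ (fun k : Nat => (0 : Int) + k)) k
      = (fun k : Nat => !(ind.contains ((0 + k : Nat) : Int))) k)]
  apply List.map_congr_left
  intro k _
  simp [Function.comp, PySem.List.pyGetD_natCast]
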